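-- pv_equiv track=rewrite | github.com/uurvrl/Python-Playground | interview_questions.py | sep_evenodd
-- ===== SOURCE A (Python) =====
-- def sep_evenodd(tonumber):
--     even_list = []
--     odd_list = []
--     for number in range(tonumber):
--         if number % 2 == 0:
--             even_list.append(number)
--         else:
--             odd_list.append(number)
--     return even_list, odd_list
-- ===== SOURCE B (Python) =====
-- def sep_evenodd(tonumber):
--     return list(range(0, tonumber, 2)), list(range(1, tonumber, 2))
-- ===== Notes on version B (the rewrite author's own statement) =====
-- stated objective: idiomatic
-- what changed: Replaces the loop over range(n) with a parity branch and two appends by direct construction of both lists as strided ranges range(0,n,2) and range(1,n,2); no loop body, no modulo test, no append.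
import Mathlib
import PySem

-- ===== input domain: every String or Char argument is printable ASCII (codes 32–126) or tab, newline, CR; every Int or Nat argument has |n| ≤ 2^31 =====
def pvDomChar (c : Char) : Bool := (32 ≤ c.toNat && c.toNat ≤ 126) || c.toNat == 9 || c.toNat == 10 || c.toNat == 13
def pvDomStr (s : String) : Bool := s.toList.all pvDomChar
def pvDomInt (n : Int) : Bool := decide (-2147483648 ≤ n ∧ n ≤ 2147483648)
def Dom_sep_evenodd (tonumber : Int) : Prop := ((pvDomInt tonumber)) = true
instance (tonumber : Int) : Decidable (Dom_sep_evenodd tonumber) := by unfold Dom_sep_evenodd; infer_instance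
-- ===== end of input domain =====

-- B builds the even and odd lists directly as strided ranges range(0,n,2) / range(1,n,2); no loop body, no parity test.

-- ===== PORT A =====
def sep_evenodd (tonumber : Int) : List Int × List Int :=
  (PySem.List.pyRange 0 tonumber 1).foldl
    (fun (acc : List Int × List Int) number =>
      if PySem.Int.mod number 2 = 0 then (acc.1 ++ [number], acc.2)
      else (acc.1, acc.2 ++ [number]))
    ([], [])

-- ===== PORT B =====
def sep_evenodd_alt (tonumber : Int) : List Int × List Int :=
  (PySem.List.pyRange 0 tonumber 2, PySem.List.pyRange 1 tonumber 2)

-- ===== PRECONDITION & SPEC =====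
def Spec_sep_evenodd (tonumber : Int) (out : List Int × List Int) : Prop := out = sep_evenodd_alt tonumber
instance (tonumber : Int) (out : List Int × List Int) : Decidable (Spec_sep_evenodd tonumber out) := by unfold Spec_sep_evenodd; infer_instance

-- ===== CLAIM (what is proved, stated in full; the proofs are below) =====
def Claim_equal_sep_evenodd : Prop := ∀ (tonumber : Int), Dom_sep_evenodd tonumber → Spec_sep_evenodd tonumber (sep_evenodd tonumber)

-- ===== LEMMAS AND PROOFS =====

theorem pv_foldl_pair (p : Int → Prop) [DecidablePred p] (l : List Int) (e o : List Int) :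
    l.foldl (fun (acc : List Int × List Int) n =>
      if p n then (acc.1 ++ [n], acc.2) else (acc.1, acc.2 ++ [n])) (e, o)
    = (e ++ l.filter (fun n => decide (p n)), o ++ l.filter (fun n => !decide (p n))) := by
  induction l generalizing e o with
  | nil => simp
  | cons a l ih => by_cases h : p a <;> simp [h, ih]

theorem pv_sorted_ext (l1 l2 : List Int) (h1 : l1.Pairwise (· < ·)) (h2 : l2.Pairwise (· < ·))
    (hm : ∀ x, x ∈ l1 ↔ x ∈ l2) : l1 = l2 := by
  have hn1 : l1.Nodup := h1.imp (fun h => by omega)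
  have hn2 : l2.Nodup := h2.imp (fun h => by omega)
  exact ((List.perm_ext_iff_of_nodup hn1 hn2).mpr hm).eq_of_pairwise (by omega) h1 h2

theorem pv_pairwise_pyRange_two (a b : Int) :
    (PySem.List.pyRange a b 2).Pairwise (· < ·) := by
  rw [PySem.List.pyRange_of_pos a b (by norm_num)]
  refine List.Pairwise.map _ ?_ (List.pairwise_lt_range)
  intro x y h
  omega

theorem pv_mem_pyRange_two (a b x : Int) :
    x ∈ PySem.List.pyRange a b 2 ↔ a ≤ x ∧ x < b ∧ 2 ∣ x - a :=
  PySem.List.mem_pyRange_iff_of_pos (by norm_num) x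

theorem pv_even_eq (t : Int) :
    (PySem.List.pyRange 0 t 1).filter (fun n => decide (2 ∣ n))
      = PySem.List.pyRange 0 t 2 := by
  refine pv_sorted_ext _ _ ((PySem.List.pairwise_lt_pyRange_one 0 t).filter _)
    (pv_pairwise_pyRange_two 0 t) ?_
  intro x
  simp only [List.mem_filter, PySem.List.mem_pyRange_one, pv_mem_pyRange_two, decide_eq_true_eq]
  omega

theorem pv_odd_eq (t : Int) :
    (PySem.List.pyRange 0 t 1).filter (fun n => !decide (2 ∣ n))
      = PySem.List.pyRange 1 t 2 := by
  refine pv_sorted_ext _ _ ((PySem.List.pairwise_lt_pyRange_one 0 t).filter _)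
    (pv_pairwise_pyRange_two 1 t) ?_
  intro x
  simp only [List.mem_filter, PySem.List.mem_pyRange_one, pv_mem_pyRange_two, Bool.not_eq_eq_eq_not, Bool.not_true, decide_eq_false_iff_not]
  omega

-- ===== VERDICT (by name: the statement is the Claim_ definition above) =====
theorem sep_evenodd_spec : Claim_equal_sep_evenodd := by
  intro t _
  unfold Spec_sep_evenodd sep_evenodd sep_evenodd_alt
  rw [pv_foldl_pair (fun n => PySem.Int.mod n 2 = 0)]
  simp [pv_even_eq, pv_odd_eq]
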